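-- pv_equiv track=rewrite | github.com/yRaffa/GS-2025-2_DynamicProgrramming | utils/grafos.py | montarGrafo
-- ===== SOURCE A (Python) =====
-- from typing import Dict, List, Set, Tuple
--
-- def montarGrafo(sk: Dict[str, dict]) -> Tuple[Dict[str, List[str]], Dict[str, int]]:
--     g = {k: [] for k in sk.keys()}
--     indeg = {k: 0 for k in sk.keys()}
--     for sid, meta in sk.items():
--         for pre in meta.get('PreRequisito', []):
--             g.setdefault(pre, []).append(sid)
--             indeg[sid] = indeg.get(sid, 0) + 1
--             indeg.setdefault(pre, 0)
--     return g, indeg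
-- ===== SOURCE B (Python) =====
-- def montarGrafo(sk):
--     # Flatten to an explicit edge list (pre, sid), then build both result maps
--     # declaratively by grouping/counting over that edge list -- no incremental
--     # dict mutation with setdefault/append at all.
--     edges = [(pre, sid) for sid, meta in sk.items()
--              for pre in meta.get('PreRequisito', [])]
--     # node order: sk's keys first, then prerequisite-only nodes in first-edge order
--     order = dict.fromkeys(list(sk) + [pre for pre, _ in edges])
--     g = {n: [sid for pre, sid in edges if pre == n] for n in order}
--     indeg = {n: sum(1 for _, sid in edges if sid == n) for n in order}
--     return g, indeg
-- ===== Notes on version B (the rewrite author's own statement) =====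
-- stated objective: alternative
-- what changed: B replaces A's incremental dict mutation (setdefault/append while iterating) with a declarative pipeline: flatten to an explicit (pre, sid) edge list, compute the node order with dict.fromkeys, then build the adjacency and in-degree maps as comprehensions that group/count over the edge list per node.
import Mathlib
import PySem

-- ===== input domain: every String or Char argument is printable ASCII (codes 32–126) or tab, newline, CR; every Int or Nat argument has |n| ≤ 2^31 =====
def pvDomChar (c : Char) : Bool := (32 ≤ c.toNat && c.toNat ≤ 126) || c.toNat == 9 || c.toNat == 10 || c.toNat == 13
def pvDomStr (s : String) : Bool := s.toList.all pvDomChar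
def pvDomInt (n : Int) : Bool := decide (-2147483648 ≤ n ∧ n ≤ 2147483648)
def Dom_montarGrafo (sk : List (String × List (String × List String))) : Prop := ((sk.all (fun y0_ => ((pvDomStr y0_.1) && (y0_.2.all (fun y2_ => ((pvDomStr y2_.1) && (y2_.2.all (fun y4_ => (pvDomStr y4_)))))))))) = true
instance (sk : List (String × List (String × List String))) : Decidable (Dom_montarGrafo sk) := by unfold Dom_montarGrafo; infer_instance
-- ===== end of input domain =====

-- B flattens the input to an explicit edge list and builds both maps declaratively by
-- grouping/counting over it (alternative decomposition; no incremental dict mutation).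


-- ===== PORT A =====
-- meta.get('PreRequisito', []) on the meta dict (used by both Pythons)
def pvPres (m : List (String × List String)) : List String :=
  (PySem.Dict.ofList m).getD "PreRequisito" []

def montarGrafo (sk : List (String × List (String × List String))) : (List (String × List String)) × (List (String × Int)) :=
  let g0 : PySem.Dict String (List String) := sk.foldl (fun d p => d.insert p.1 []) PySem.Dict.empty
  let i0 : PySem.Dict String Int := sk.foldl (fun d p => d.insert p.1 0) PySem.Dict.empty
  let st := sk.foldl (fun (st : PySem.Dict String (List String) × PySem.Dict String Int) p =>
      (pvPres p.2).foldl (fun st pre =>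
        (st.1.modify pre [] (· ++ [p.1]),
         (st.2.insert p.1 (st.2.getD p.1 0 + 1)).setdefault pre 0)) st) (g0, i0)
  (st.1.items, st.2.items)

-- ===== PORT B =====
def montarGrafo_alt (sk : List (String × List (String × List String))) : (List (String × List String)) × (List (String × Int)) :=
  -- edges = [(pre, sid) for sid, meta in sk.items() for pre in meta.get('PreRequisito', [])]
  let edges : List (String × String) :=
    sk.flatMap (fun p => (pvPres p.2).map (fun pre => (pre, p.1)))
  -- order = dict.fromkeys(list(sk) + [pre for pre, _ in edges])  (keys in first-appearance order)
  let order : List String := PySem.List.dedup (sk.map Prod.fst ++ edges.map Prod.fst)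
  -- g = {n: [sid for pre, sid in edges if pre == n] for n in order}
  let g : List (String × List String) :=
    order.map (fun n => (n, (edges.filter (fun e => e.1 == n)).map Prod.snd))
  -- indeg = {n: sum(1 for _, sid in edges if sid == n) for n in order}  (sum of 1s = count)
  let indeg : List (String × Int) :=
    order.map (fun n => (n, ((edges.countP (fun e => e.2 == n)) : Int)))
  (g, indeg)

-- ===== PRECONDITION & SPEC =====
def Spec_montarGrafo (sk : List (String × List (String × List String))) (out : (List (String × List String)) × (List (String × Int))) : Prop := out = montarGrafo_alt sk
instance (sk : List (String × List (String × List String))) (out : (List (String × List String)) × (List (String × Int))) : Decidable (Spec_montarGrafo sk out) := by unfold Spec_montarGrafo; infer_instance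

-- ===== CLAIM (what is proved, stated in full; the proofs are below) =====
def Claim_equal_montarGrafo : Prop := ∀ (sk : List (String × List (String × List String))), Dom_montarGrafo sk → Spec_montarGrafo sk (montarGrafo sk)

-- ===== LEMMAS AND PROOFS =====

-- the edge list (pre, sid) in A's iteration order
def edgesOf (sk : List (String × List (String × List String))) : List (String × String) :=
  sk.flatMap (fun p => (pvPres p.2).map (fun pre => (pre, p.1)))

-- the two per-edge state updates of A's fused loop
def fgE (d : PySem.Dict String (List String)) (e : String × String) : PySem.Dict String (List String) :=
  d.modify e.1 [] (· ++ [e.2])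
def fiE (d : PySem.Dict String Int) (e : String × String) : PySem.Dict String Int :=
  (d.insert e.2 (d.getD e.2 0 + 1)).setdefault e.1 0

theorem fused_split (sk : List (String × List (String × List String)))
    (g : PySem.Dict String (List String)) (i : PySem.Dict String Int) :
    sk.foldl (fun (st : PySem.Dict String (List String) × PySem.Dict String Int) p =>
      (pvPres p.2).foldl (fun st pre =>
        (st.1.modify pre [] (· ++ [p.1]),
         (st.2.insert p.1 (st.2.getD p.1 0 + 1)).setdefault pre 0)) st) (g, i)
    = ((edgesOf sk).foldl fgE g, (edgesOf sk).foldl fiE i) := by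
  rw [← PySem.List.foldl_prod_mk fgE fiE (edgesOf sk) g i]
  unfold edgesOf
  rw [List.foldl_flatMap]
  simp only [List.foldl_map, fgE, fiE]

theorem getD_insert_const {β ν : Type} (l : List β) (key : β → String) (v0 : ν) (k : String) :
    ∀ d : PySem.Dict String ν, d.getD k v0 = v0 →
      (l.foldl (fun d x => d.insert (key x) v0) d).getD k v0 = v0 := by
  induction l with
  | nil => intro d h; simpa using h
  | cons x l ih =>
    intro d h
    simp only [List.foldl_cons]
    exact ih _ (by rw [PySem.Dict.getD_insert]; split <;> simp [h])

theorem getD_setdefault_zero (d : PySem.Dict String Int) (a k : String) :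
    (d.setdefault a 0).getD k 0 = d.getD k 0 := by
  by_cases h : k = a
  · subst h; exact PySem.Dict.getD_setdefault_self d k 0 0
  · rw [PySem.Dict.getD_eq_get?_getD, PySem.Dict.get?_setdefault_of_ne d 0 h,
      ← PySem.Dict.getD_eq_get?_getD]

theorem indegA_items (es : List (String × String)) :
    ∀ (g : PySem.Dict String (List String)) (i : PySem.Dict String Int),
      g.keys.Nodup → i.keys = g.keys → (∀ e ∈ es, e.2 ∈ g.keys) →
      (es.foldl fiE i).items
        = (es.foldl fgE g).keys.map (fun k => (k, i.getD k 0 + ((es.map Prod.snd).count k : Int))) := by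
  induction es with
  | nil =>
    intro g i hnd hk _
    simp only [List.foldl_nil, List.map_nil, List.count_nil, Nat.cast_zero, add_zero]
    rw [PySem.Dict.items_eq_map_keys i (hk ▸ hnd) 0, hk]
  | cons e es ih =>
    intro g i hnd hk hmem
    have hie2 : i.contains e.2 = true :=
      (PySem.Dict.contains_iff_mem_keys i e.2).mpr (hk ▸ hmem e (by simp))
    have hbr : i.contains e.1 = g.contains e.1 := by
      rw [PySem.Dict.contains_eq_decide_mem_keys, PySem.Dict.contains_eq_decide_mem_keys, hk]
    have hkg : (fgE g e).keys = if g.contains e.1 then g.keys else g.keys ++ [e.1] := by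
      unfold fgE
      rw [PySem.Dict.keys_modify]
      by_cases hc : g.contains e.1
      · rw [PySem.Dict.keys_insert_of_contains _ _ hc, if_pos hc]
      · rw [PySem.Dict.keys_insert_of_not_contains _ _ (by simpa using hc), if_neg hc]
    have hki : (fiE i e).keys = if g.contains e.1 then g.keys else g.keys ++ [e.1] := by
      unfold fiE
      have hci : (i.insert e.2 (i.getD e.2 0 + 1)).contains e.1 = g.contains e.1 := by
        rw [PySem.Dict.contains_insert]
        by_cases hx : e.1 = e.2
        · rw [hx] at hbr ⊢
          simp [hie2, ← hbr]
        · rw [show (e.1 == e.2) = false from by simpa using hx]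
          simpa using hbr
      rw [PySem.Dict.keys_setdefault, hci,
        PySem.Dict.keys_insert_of_contains _ _ hie2, hk]
    have hnd' : (fgE g e).keys.Nodup := by
      rw [hkg]
      by_cases hc : g.contains e.1
      · simpa [hc] using hnd
      · have : e.1 ∉ g.keys := fun hm => by
          simp [(PySem.Dict.contains_iff_mem_keys g e.1).mpr hm] at hc
        rw [if_neg hc]
        simp only [List.nodup_append, List.nodup_cons]
        refine ⟨hnd, by simp, ?_⟩
        intro a ha b hb heq
        rw [List.mem_singleton.mp hb] at heq
        exact this (heq ▸ ha)
    have hk' : (fiE i e).keys = (fgE g e).keys := by rw [hki, hkg]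
    have hmem' : ∀ e' ∈ es, e'.2 ∈ (fgE g e).keys := by
      intro e' h
      rw [hkg]
      have := hmem e' (by simp [h])
      split <;> simp [this]
    simp only [List.foldl_cons]
    rw [ih (fgE g e) (fiE i e) hnd' hk' hmem']
    have hfun : (fun k => (k, (fiE i e).getD k 0 + ((es.map Prod.snd).count k : Int)))
        = fun k => (k, i.getD k 0 + ((((e :: es)).map Prod.snd).count k : Int)) := by
      funext k
      unfold fiE
      rw [getD_setdefault_zero, PySem.Dict.getD_insert]
      simp only [List.map_cons, List.count_cons]
      by_cases hx : k = e.2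
      · subst hx
        simp only [beq_self_eq_true, if_pos]
        push_cast
        ring_nf
      · rw [if_neg hx]
        simp only [show (e.2 == k) = false by simpa using fun h => hx h.symm]
        simp
    rw [hfun]

theorem g0_keys (sk : List (String × List (String × List String))) :
    (sk.foldl (fun d p => d.insert p.1 ([] : List String)) PySem.Dict.empty).keys
      = PySem.Set.update [] (sk.map Prod.fst) := by
  rw [PySem.Dict.keys_foldl_insert_key sk Prod.fst (fun _ _ => ([] : List String)) _,
    PySem.Dict.keys_empty]

theorem i0_keys (sk : List (String × List (String × List String))) :
    (sk.foldl (fun d p => d.insert p.1 (0 : Int)) PySem.Dict.empty).keys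
      = PySem.Set.update [] (sk.map Prod.fst) := by
  rw [PySem.Dict.keys_foldl_insert_key sk Prod.fst (fun _ _ => (0 : Int)) _,
    PySem.Dict.keys_empty]

theorem g0_nodup (sk : List (String × List (String × List String))) :
    (sk.foldl (fun d p => d.insert p.1 ([] : List String)) PySem.Dict.empty).keys.Nodup :=
  PySem.Dict.nodup_keys_foldl_insert_key sk Prod.fst (fun _ _ => ([] : List String)) _
    (by rw [PySem.Dict.keys_empty]; exact List.nodup_nil)

theorem edge_snd_mem (sk : List (String × List (String × List String)))
    {e : String × String} (h : e ∈ edgesOf sk) : e.2 ∈ sk.map Prod.fst := by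
  unfold edgesOf at h
  simp only [List.mem_flatMap, List.mem_map] at h
  obtain ⟨p, hp, pre, _, rfl⟩ := h
  exact List.mem_map.mpr ⟨p, hp, rfl⟩

theorem foldl_fgE_unfold (d : PySem.Dict String (List String)) (l : List (String × String)) :
    List.foldl fgE d l = List.foldl (fun d e => d.modify e.1 [] (· ++ [e.2])) d l := rfl

theorem gA_keys (sk : List (String × List (String × List String))) :
    ((edgesOf sk).foldl fgE (sk.foldl (fun d p => d.insert p.1 []) PySem.Dict.empty)).keys
      = PySem.Set.update (PySem.Set.update [] (sk.map Prod.fst)) ((edgesOf sk).map Prod.fst) := by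
  rw [foldl_fgE_unfold]
  rw [PySem.Dict.keys_foldl_modify_key (edgesOf sk) Prod.fst ([] : List String)
    (fun _ e => (· ++ [e.2])) _, g0_keys]

theorem gA_nodup (sk : List (String × List (String × List String))) :
    ((edgesOf sk).foldl fgE (sk.foldl (fun d p => d.insert p.1 []) PySem.Dict.empty)).keys.Nodup := by
  rw [foldl_fgE_unfold]
  exact PySem.Dict.nodup_keys_foldl_modify_key (edgesOf sk) Prod.fst ([] : List String)
    (fun _ e => (· ++ [e.2])) _ (g0_nodup sk)

theorem gA_getD (sk : List (String × List (String × List String))) (c : String) :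
    ((edgesOf sk).foldl fgE (sk.foldl (fun d p => d.insert p.1 []) PySem.Dict.empty)).getD c []
      = ((edgesOf sk).filter (fun p => p.1 == c)).map Prod.snd := by
  rw [foldl_fgE_unfold]
  rw [PySem.Dict.getD_foldl_modify_append (edgesOf sk) _ c]
  rw [getD_insert_const sk Prod.fst ([] : List String) c PySem.Dict.empty
    (by simp [PySem.Dict.getD_empty])]
  simp

-- update (update [] a) b is dedup (a ++ b): both are the first occurrences of a ++ b in order
theorem update_update_eq_dedup (a b : List String) :
    PySem.Set.update (PySem.Set.update ([] : PySem.Set String) a) b = PySem.List.dedup (a ++ b) := by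
  rw [PySem.List.dedup_eq_ofList, PySem.Set.ofList_eq_foldl]
  simp [PySem.Set.update, List.foldl_append]

theorem count_map_snd (es : List (String × String)) (k : String) :
    ((es.map Prod.snd).count k : Int) = (es.countP (fun e => e.2 == k) : Int) := by
  rw [List.count_eq_countP, List.countP_map]
  rfl

theorem montarGrafo_eq_alt (sk : List (String × List (String × List String))) :
    montarGrafo sk = montarGrafo_alt sk := by
  simp only [montarGrafo, montarGrafo_alt]
  rw [fused_split]
  set g0 : PySem.Dict String (List String) :=
    sk.foldl (fun d p => d.insert p.1 []) PySem.Dict.empty with hg0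
  set i0 : PySem.Dict String Int :=
    sk.foldl (fun d p => d.insert p.1 0) PySem.Dict.empty with hi0
  set gA : PySem.Dict String (List String) := (edgesOf sk).foldl fgE g0 with hgA
  have horder : gA.keys = PySem.List.dedup (sk.map Prod.fst ++ (edgesOf sk).map Prod.fst) := by
    rw [hgA, hg0, gA_keys, update_update_eq_dedup]
  refine Prod.ext ?_ ?_
  · -- adjacency lists
    rw [PySem.Dict.items_eq_map_keys gA (hgA ▸ hg0 ▸ gA_nodup sk) [], horder]
    apply List.map_congr_left
    intro k _
    rw [hgA, hg0, gA_getD sk k]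
    rfl
  · -- in-degrees
    have hmemA : ∀ e ∈ edgesOf sk, e.2 ∈ g0.keys := by
      intro e he
      rw [hg0, g0_keys]
      exact (PySem.Set.mem_update _ _ _).mpr (Or.inr (edge_snd_mem sk he))
    have hkeq : i0.keys = g0.keys := by rw [hg0, hi0, g0_keys, i0_keys]
    rw [indegA_items (edgesOf sk) g0 i0 (hg0 ▸ g0_nodup sk) hkeq hmemA, ← hgA, horder]
    apply List.map_congr_left
    intro k _
    rw [getD_insert_const sk Prod.fst (0 : Int) k PySem.Dict.empty (by simp [PySem.Dict.getD_empty])]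
    rw [count_map_snd]
    simp [edgesOf]

-- ===== VERDICT (by name: the statement is the Claim_ definition above) =====
theorem montarGrafo_spec : Claim_equal_montarGrafo := by
  intro sk _
  unfold Spec_montarGrafo
  exact montarGrafo_eq_alt sk
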